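-- pv_equiv track=rewrite | github.com/joojeehwan/algorithm_genius | Programmers/92342_양궁대회/jeehwan_92342.py | solution
-- ===== SOURCE A (Python) =====
-- def solution(n, info):
--     answer = [0 for _ in range(11)]
--     temp = [0 for _ in range(11)]  # 라이언이 쏜 배열을 저장하는 임시 배열 => 원래의 값과 이전 값을 비교해 가면서, 가장 큰 차이로 이기게 되는 값을 찾아간다.
--     maxDiff = 0  # 가장 큰 차이로 라이언이 이기게 되는 점수
--
--     for subset in range(1, 1 << 10):
--
--         # subset : 1 - 1023 이를 이진수로 표현해서 , on/off를 표현 할 수 있음.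
--         # 지금의 subset의 경우는 라이언이 이긴다면 1로 표현아니면 0
--
--         ryan = 0  # 라이언이 획득한 점수
--         apeach = 0  # 어피치가 획득한 점수
--         cnt = 0  # 라이언이 화살을 쏜 횟수
--
--         # i번쨰 원소가, 이 부분집합에 존재 하는 지 확인
--         for i in range(10):
--             if subset & (1 << i):
--                 # 만약에 부분집합에 i번쨰에 값이 있으면 & 연산에 의해서 값이 1이 되니 True가 된다. 즉, 라이언이 이기게 되는 경우
--
--                 ryan += 10 - i
--                 temp[i] = info[i] + 1  # 라이언이 어피치를 이기기 위해서는 어피치 보다 1발만 더 쏘면 된다.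
--                 cnt += temp[i]  # tmp[i] 에는 라이언이 쏘는 화살의 갯수가 담길테니!
--             else:
--                 temp[i] = 0  # 라이언이 점수를 얻어서는 안돼
--                 if info[i]:  # 근데 어피치는 과녁에 맞춘 적이 있다면,
--                     apeach += 10 - i
--
--         if cnt > n:  # 라이언이 발사한 화살이 n보다는 많아지면 안된다.
--             continue
--
--         # 라이언의 "0점"에 기록할 화살의 갯수를 카운팅 로직
--         temp[10] = n - cnt
--
--         # 그전에 알고 있던 maxDiff 값과 비교
--
--         if ryan - apeach == maxDiff:
--             for i in reversed(range(11)):  # 뒤에서 부터 확인해야 하니!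
--
--                 if temp[i] > answer[i]:  # 낮은 점수를 더 많이 맞춘 경우를 확인해야 하니!
--                     maxDiff = ryan - apeach
--                     answer = temp[:]
--                     break
--
--                 elif temp[i] < answer[i]:
--                     break
--
--         elif ryan - apeach > maxDiff:
--
--             maxDiff = ryan - apeach
--             answer = temp[:]  # 정답에 temp 배열을 복사해서 넣어준다.
--
--     # 라이언이 못이기는 경우도 있기에! 계속 maxDiff가 0 이라면,
--     if maxDiff == 0:
--         answer = [-1]
--
--     return answer
-- ===== SOURCE B (Python) =====
-- def solution(n, info):
--     # DFS over the 10 scoring zones: at each zone Ryan either abandons it (0 arrows)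
--     # or beats apeach there (info[i]+1 arrows); leftover arrows go to the 0-point slot.
--     def dfs(i, ryan, apeach, cnt, dist):
--         if i == 10:
--             if cnt > n:
--                 return []
--             return [(ryan - apeach, dist + [n - cnt])]
--         lose = dfs(i + 1, ryan, apeach + ((10 - i) if info[i] else 0), cnt, dist + [0])
--         win = dfs(i + 1, ryan + (10 - i), apeach, cnt + info[i] + 1, dist + [info[i] + 1])
--         return lose + win
--     best = None
--     for diff, dist in dfs(0, 0, 0, 0, []):
--         if diff > 0 and (best is None or (diff, dist[::-1]) > (best[0], best[1][::-1])):
--             best = (diff, dist)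
--     return best[1] if best else [-1]
-- ===== Notes on version B (the rewrite author's own statement) =====
-- stated objective: alternative
-- what changed: Replaces A's bitmask loop over range(1, 1<<10) (which re-scores each subset bit-by-bit while mutating a shared temp array and tie-breaking inside the state-update loop) by a recursive DFS over the 10 zones carrying (ryan, apeach, cnt, dist) that emits the feasible candidate distributions, followed by one best-candidate scan using the explicit lexicographic key (diff, reversed distribution).
import Mathlib
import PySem

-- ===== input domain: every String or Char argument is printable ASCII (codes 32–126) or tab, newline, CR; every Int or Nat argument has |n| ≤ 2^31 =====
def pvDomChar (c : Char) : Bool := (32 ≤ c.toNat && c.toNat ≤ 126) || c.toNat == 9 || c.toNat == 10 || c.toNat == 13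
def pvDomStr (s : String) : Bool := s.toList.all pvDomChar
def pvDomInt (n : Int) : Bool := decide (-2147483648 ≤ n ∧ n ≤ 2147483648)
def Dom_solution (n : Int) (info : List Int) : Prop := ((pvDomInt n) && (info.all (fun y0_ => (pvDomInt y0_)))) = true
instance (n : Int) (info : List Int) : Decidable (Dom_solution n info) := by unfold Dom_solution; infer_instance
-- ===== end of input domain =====

-- B replaces A's 1<<10 bitmask scan by a recursive DFS over the 10 zones plus a single
-- best-candidate scan (objective: alternative decomposition, same exact output).

-- ===== PORT A =====
-- A's inner `for i in range(10)` loop body; q = (ryan, apeach, cnt, temp).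
-- info[i] is info.getD i 0: Pre_solution guarantees i < info.length, so this is Python-exact.
def aInner (info : List Int) (s : Nat) (q : Int × Int × Int × List Int) (i : Nat) :
    Int × Int × Int × List Int :=
  if s &&& (1 <<< i) ≠ 0 then
    (q.1 + (10 - (i : Int)), q.2.1, q.2.2.1 + (info.getD i 0 + 1), q.2.2.2.set i (info.getD i 0 + 1))
  else
    (q.1, if info.getD i 0 ≠ 0 then q.2.1 + (10 - (i : Int)) else q.2.1, q.2.2.1, q.2.2.2.set i 0)

-- A's `for i in reversed(range(11))` tie-break loop with its two `break`s;
-- temp and answer always have length 11, so `getD _ 0` is Python-exact indexing.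
def aBreak : List Nat → List Int → List Int → Int → Int → List Int × Int
  | [], _, answer, _, maxDiff => (answer, maxDiff)
  | i :: rest, temp, answer, diff, maxDiff =>
    if temp.getD i 0 > answer.getD i 0 then (temp, diff)
    else if temp.getD i 0 < answer.getD i 0 then (answer, maxDiff)
    else aBreak rest temp answer diff maxDiff

-- one iteration of A's `for subset in range(1, 1 << 10)` loop; state (answer, temp, maxDiff)
def aStep (n : Int) (info : List Int) (st : List Int × List Int × Int) (s : Nat) :
    List Int × List Int × Int :=
  let q := (List.range 10).foldl (aInner info s) (0, 0, 0, st.2.1)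
  if q.2.2.1 > n then (st.1, q.2.2.2, st.2.2)
  else
    let temp := q.2.2.2.set 10 (n - q.2.2.1)
    if q.1 - q.2.1 = st.2.2 then
      let r := aBreak ((List.range 11).reverse) temp st.1 (q.1 - q.2.1) st.2.2
      (r.1, temp, r.2)
    else if q.1 - q.2.1 > st.2.2 then (temp, temp, q.1 - q.2.1)
    else (st.1, temp, st.2.2)

-- subsets range(1, 1<<10) are the naturals 1..1023: List.range' 1 1023
def solution (n : Int) (info : List Int) : List Int :=
  let st := (List.range' 1 1023).foldl (aStep n info) (List.replicate 11 0, List.replicate 11 0, 0)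
  if st.2.2 = 0 then [-1] else st.1

-- ===== PORT B =====
-- Python's `>` on two int lists (lexicographic, shorter prefix is smaller); ported by hand, exact for int lists
def bListGt : List Int → List Int → Bool
  | _ :: _, [] => true
  | [], _ => false
  | x :: xs, y :: ys => if x > y then true else if x < y then false else bListGt xs ys

-- Source B's dfs(i, ryan, apeach, cnt, dist): the Python recursion on i = 0..10 is the
-- structural recursion on the list of remaining zones [i, …, 9] (called with range 10).
def bDfs (n : Int) (info : List Int) : List Nat → Int → Int → Int → List Int → List (Int × List Int)
  | [], ryan, apeach, cnt, dist =>
    if cnt > n then [] else [(ryan - apeach, dist ++ [n - cnt])]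
  | i :: rest, ryan, apeach, cnt, dist =>
    bDfs n info rest ryan (if info.getD i 0 ≠ 0 then apeach + (10 - (i : Int)) else apeach) cnt (dist ++ [0]) ++
    bDfs n info rest (ryan + (10 - (i : Int))) apeach (cnt + (info.getD i 0 + 1)) (dist ++ [info.getD i 0 + 1])

-- body of Source B's `for diff, dist in …` loop; dist[::-1] is List.reverse;
-- `(d1,l1) > (d2,l2)` is Python's lexicographic tuple comparison, written out
def bStep (best : Option (Int × List Int)) (c : Int × List Int) : Option (Int × List Int) :=
  match best with
  | none => if c.1 > 0 then some c else none
  | some b =>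
    if c.1 > 0 ∧ (c.1 > b.1 ∨ (c.1 = b.1 ∧ bListGt c.2.reverse b.2.reverse = true)) then some c
    else some b

def solution_alt (n : Int) (info : List Int) : List Int :=
  match (bDfs n info (List.range 10) 0 0 0 []).foldl bStep none with
  | none => [-1]
  | some b => b.2

-- ===== PRECONDITION & SPEC =====
-- Pre_ excludes exactly the inputs where A raises IndexError (info shorter than 10 entries).
def Pre_solution (n : Int) (info : List Int) : Prop := 10 ≤ info.length
instance (n : Int) (info : List Int) : Decidable (Pre_solution n info) := by
  unfold Pre_solution; infer_instance

def pvWitness_solution : Int × List Int := (5, [2, 1, 1, 1, 0, 0, 0, 0, 0, 0])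

def Spec_solution (n : Int) (info : List Int) (out : List Int) : Prop := out = solution_alt n info
instance (n : Int) (info : List Int) (out : List Int) : Decidable (Spec_solution n info out) := by
  unfold Spec_solution; infer_instance

-- ===== CLAIM (what is proved, stated in full; the proofs are below) =====
def Claim_equal_solution : Prop :=
  ∀ (n : Int) (info : List Int), Dom_solution n info → Pre_solution n info →
    Spec_solution n info (solution n info)

-- ===== LEMMAS AND PROOFS =====

-- abstract candidate machinery shared by the two directions of the proof --------------

-- per-subset data read off bit by bit along a zone list (bit 0 ↔ first zone):
-- (diff, cnt, dist) for the subset encoded by s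
def cT (info : List Int) : List Nat → Int → Int → Int → List Int → Nat → Int × Int × List Int
  | [], r, a, _c, dist, _s => (r - a, _c, dist)
  | i :: rest, r, a, c, dist, s =>
    if s % 2 = 1 then
      cT info rest (r + (10 - (i : Int))) a (c + (info.getD i 0 + 1)) (dist ++ [info.getD i 0 + 1]) (s / 2)
    else
      cT info rest r (if info.getD i 0 ≠ 0 then a + (10 - (i : Int)) else a) c (dist ++ [0]) (s / 2)

-- same data via absolute testBit, shaped like A's inner loop: (ryan, apeach, cnt, dist)
def acc4 (info : List Int) : List Nat → Nat → Int × Int × Int × List Int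
  | [], _ => (0, 0, 0, [])
  | i :: rest, s =>
    if s.testBit i then
      (10 - (i : Int) + (acc4 info rest s).1, (acc4 info rest s).2.1,
       (info.getD i 0 + 1) + (acc4 info rest s).2.2.1, (info.getD i 0 + 1) :: (acc4 info rest s).2.2.2)
    else
      ((acc4 info rest s).1,
       if info.getD i 0 ≠ 0 then 10 - (i : Int) + (acc4 info rest s).2.1 else (acc4 info rest s).2.1,
       (acc4 info rest s).2.2.1, 0 :: (acc4 info rest s).2.2.2)

-- all candidates in Source B's DFS order (unfiltered)
def enumC (info : List Int) : List Nat → Int → Int → Int → List Int → List (Int × Int × List Int)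
  | [], r, a, c, dist => [(r - a, c, dist)]
  | i :: rest, r, a, c, dist =>
    enumC info rest r (if info.getD i 0 ≠ 0 then a + (10 - (i : Int)) else a) c (dist ++ [0]) ++
    enumC info rest (r + (10 - (i : Int))) a (c + (info.getD i 0 + 1)) (dist ++ [info.getD i 0 + 1])

-- feasibility filter: drop cnt > n, place the leftover arrows in the 0-point slot
def feas (n : Int) (c : Int × Int × List Int) : Option (Int × List Int) :=
  if c.2.1 > n then none else some (c.1, c.2.2 ++ [n - c.2.1])

def cTri (info : List Int) (s : Nat) : Int × Int × List Int :=
  ((acc4 info (List.range' 0 10) s).1 - (acc4 info (List.range' 0 10) s).2.1,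
   (acc4 info (List.range' 0 10) s).2.2.1, (acc4 info (List.range' 0 10) s).2.2.2)

-- ghost version of A's loop state (answer, maxDiff), temp dropped
def gu (st : List Int × Int) (c : Int × List Int) : List Int × Int :=
  if c.1 = st.2 then (if bListGt c.2.reverse st.1.reverse = true then (c.2, c.1) else st)
  else if c.1 > st.2 then (c.2, c.1) else st

def gstep (n : Int) (info : List Int) (st : List Int × Int) (s : Nat) : List Int × Int :=
  (feas n (cTri info s)).elim st (gu st)

def PInv (st : List Int × Int) (best : Option (Int × List Int)) : Prop :=
  (st.2 = 0 ∧ best = none) ∨ (0 < st.2 ∧ best = some (st.2, st.1))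

-- basic facts --------------------------------------------------------------------------

theorem acc4_len (info : List Int) : ∀ (zones : List Nat) (s : Nat),
    (acc4 info zones s).2.2.2.length = zones.length := by
  intro zones; induction zones with
  | nil => intro s; rfl
  | cons i rest ih => intro s; simp only [acc4]; split <;> simp [ih]

theorem testBit_iff (s j : Nat) : (s &&& (1 <<< j) ≠ 0) ↔ s.testBit j = true := by
  simp [Nat.one_shiftLeft, Nat.and_two_pow]

theorem mod_two_shift (s j : Nat) : ((s >>> j) % 2 = 1) ↔ s.testBit j = true := by
  rw [Nat.testBit_eq_decide_div_mod_eq, Nat.shiftRight_eq_div_pow]; simp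

theorem set_take_succ (l : List Int) (j : Nat) (v : Int) (h : j < l.length) :
    (l.set j v).take (j+1) = l.take j ++ [v] := by
  rw [List.set_eq_take_cons_drop v h, List.take_append]
  simp [Nat.min_eq_left (Nat.le_of_lt h)]

theorem set_getD_ten (l : List Int) (j : Nat) (v : Int) (h : j ≠ 10) :
    (l.set j v).getD 10 0 = l.getD 10 0 := by
  simp only [List.getD]
  rw [List.getElem?_set_ne h]

theorem take_ten_getD (l : List Int) (h : l.length = 11) :
    l.take 10 ++ [l.getD 10 0] = l := by
  rw [List.getD_eq_getElem l 0 (by omega)]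
  conv_rhs => rw [← List.take_append_drop 10 l]
  congr 1
  rw [List.drop_eq_getElem_cons (by omega)]
  simp [List.drop_eq_nil_of_le, h]

theorem set_last (l1 : List Int) (x y : Int) (h : l1.length = 10) :
    (l1 ++ [x]).set 10 y = l1 ++ [y] := by
  rw [← h, List.set_append_right] <;> simp

theorem inner_spec (info : List Int) (s : Nat) : ∀ (k j : Nat), j + k = 10 →
    ∀ (r a c : Int) (temp : List Int), temp.length = 11 →
    (List.range' j k).foldl (aInner info s) (r, a, c, temp) =
      (r + (acc4 info (List.range' j k) s).1,
       a + (acc4 info (List.range' j k) s).2.1,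
       c + (acc4 info (List.range' j k) s).2.2.1,
       temp.take j ++ (acc4 info (List.range' j k) s).2.2.2 ++ [temp.getD 10 0]) := by
  intro k
  induction k with
  | zero =>
    intro j hj r a c temp ht
    have hj10 : j = 10 := by omega
    subst hj10
    simp only [List.range', acc4, List.foldl_nil, List.append_nil]
    rw [take_ten_getD temp ht]
    simp
  | succ k ih =>
    intro j hj r a c temp ht
    have hjlt : j < temp.length := by omega
    rw [List.range'_succ, List.foldl_cons]
    cases hb : s.testBit j with
    | true =>
      have hband : s &&& (1 <<< j) ≠ 0 := (testBit_iff s j).2 hb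
      simp only [aInner, if_pos hband]
      rw [ih (j+1) (by omega) _ _ _ _ (by simp [ht])]
      simp only [acc4, hb, eq_self_iff_true, ite_true, Bool.false_eq_true, ite_false]
      rw [set_take_succ temp j _ hjlt, set_getD_ten temp j _ (by omega)]
      simp only [Prod.mk.injEq, List.append_assoc, List.cons_append, List.nil_append]
      and_intros <;> first | trivial | (split_ifs <;> ring) | ring
    | false =>
      have hband : ¬ s &&& (1 <<< j) ≠ 0 := fun h => by
        rw [(testBit_iff s j).1 h] at hb; exact Bool.noConfusion hb
      simp only [aInner, if_neg hband]
      rw [ih (j+1) (by omega) _ _ _ _ (by simp [ht])]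
      simp only [acc4, hb, eq_self_iff_true, ite_true, Bool.false_eq_true, ite_false]
      rw [set_take_succ temp j _ hjlt, set_getD_ten temp j _ (by omega)]
      simp only [Prod.mk.injEq, List.append_assoc, List.cons_append, List.nil_append]
      and_intros <;> first | trivial | (split_ifs <;> ring) | ring

theorem cT_acc4 (info : List Int) : ∀ (k j s : Nat) (r a c : Int) (dist : List Int),
    cT info (List.range' j k) r a c dist (s >>> j) =
      (r + (acc4 info (List.range' j k) s).1 - (a + (acc4 info (List.range' j k) s).2.1),
       c + (acc4 info (List.range' j k) s).2.2.1,
       dist ++ (acc4 info (List.range' j k) s).2.2.2) := by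
  intro k
  induction k with
  | zero => intro j s r a c dist; simp [cT, acc4]
  | succ k ih =>
    intro j s r a c dist
    rw [List.range'_succ]
    cases hb : s.testBit j with
    | true =>
      have hm : (s >>> j) % 2 = 1 := (mod_two_shift s j).2 hb
      simp only [cT, acc4, hm, eq_self_iff_true, ite_true, hb, Bool.false_eq_true, ite_false]
      rw [← Nat.shiftRight_succ, ih (j+1) s]
      simp only [Prod.mk.injEq, List.append_assoc, List.cons_append, List.nil_append]
      and_intros <;> first | trivial | (split_ifs <;> ring) | ring
    | false =>
      have hm : ¬ (s >>> j) % 2 = 1 := fun h => by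
        rw [(mod_two_shift s j).1 h] at hb; exact Bool.noConfusion hb
      simp only [cT, acc4, if_neg hm, hb, Bool.false_eq_true, ite_false]
      rw [← Nat.shiftRight_succ, ih (j+1) s]
      simp only [Prod.mk.injEq, List.append_assoc, List.cons_append, List.nil_append]
      and_intros <;> first | trivial | (split_ifs <;> ring) | ring

theorem cT_zero (info : List Int) : ∀ (zones : List Nat), (∀ i ∈ zones, i ≤ 10) →
    ∀ (r a c : Int) (dist : List Int), (cT info zones r a c dist 0).1 ≤ r - a := by
  intro zones
  induction zones with
  | nil => intro _ r a c dist; simp [cT]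
  | cons i rest ih =>
    intro hz r a c dist
    have hi : (i : Int) ≤ 10 := by exact_mod_cast hz i (List.mem_cons_self ..)
    have hrest : ∀ j ∈ rest, j ≤ 10 := fun j hj => hz j (List.mem_cons_of_mem _ hj)
    simp only [cT, Nat.zero_mod, Nat.zero_div, if_neg (by omega : ¬ (0:Nat) = 1)]
    refine le_trans (ih hrest r _ c (dist ++ [0])) ?_
    split <;> omega

theorem aBreak_spec : ∀ (k : Nat), k ≤ 11 → ∀ (temp ans : List Int), temp.length = 11 →
    ans.length = 11 → ∀ (d md : Int),
    aBreak ((List.range k).reverse) temp ans d md =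
      if bListGt (temp.take k).reverse (ans.take k).reverse = true then (temp, d) else (ans, md) := by
  intro k
  induction k with
  | zero => intro _ temp ans _ _ d md; simp [aBreak, bListGt]
  | succ k ih =>
    intro hk temp ans ht ha d md
    have htk : k < temp.length := by omega
    have hak : k < ans.length := by omega
    rw [List.range_succ, List.reverse_append]
    simp only [List.reverse_cons, List.reverse_nil, List.nil_append, List.singleton_append]
    rw [List.take_succ_eq_append_getElem htk, List.take_succ_eq_append_getElem hak,
      List.reverse_append, List.reverse_append]
    simp only [List.reverse_cons, List.reverse_nil, List.nil_append, List.singleton_append]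
    simp only [aBreak, bListGt, List.getD_eq_getElem temp 0 htk, List.getD_eq_getElem ans 0 hak]
    by_cases h1 : temp[k] > ans[k]
    · simp [h1]
    · by_cases h2 : temp[k] < ans[k]
      · simp [h1, h2]
      · simp only [if_neg h1, if_neg h2]
        exact ih (by omega) temp ans ht ha d md

-- A's real step projects onto the ghost step --------------------------------------------

theorem aStep_eq (n : Int) (info : List Int) (s : Nat) (ans temp : List Int) (md : Int)
    (ht : temp.length = 11) (ha : ans.length = 11) :
    ∃ temp', aStep n info (ans, temp, md) s =
        ((gstep n info (ans, md) s).1, temp', (gstep n info (ans, md) s).2) ∧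
      temp'.length = 11 := by
  have hinner := inner_spec info s 10 0 (by omega) 0 0 0 temp ht
  have hwlen : (acc4 info (List.range' 0 10) s).2.2.2.length = 10 := by
    rw [acc4_len]
    simp
  simp only [List.take_zero, List.nil_append, zero_add] at hinner
  simp only [aStep, gstep, cTri, feas,
    show (List.range 10) = List.range' 0 10 from List.range_eq_range', hinner]
  by_cases hcnt : (acc4 info (List.range' 0 10) s).2.2.1 > n
  · rw [if_pos hcnt, if_pos hcnt]
    simp only [Option.elim]
    exact ⟨_, rfl, by simp [hwlen]⟩
  · rw [if_neg hcnt, if_neg hcnt, set_last _ _ _ hwlen]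
    simp only [Option.elim, gu]
    by_cases hdm : (acc4 info (List.range' 0 10) s).1 - (acc4 info (List.range' 0 10) s).2.1 = md
    · rw [if_pos hdm, if_pos hdm,
        aBreak_spec 11 (le_refl _) _ ans (by simp [hwlen]) ha _ md,
        List.take_of_length_le (by simp [hwlen]), List.take_of_length_le (by omega)]
      split_ifs with hg
      · exact ⟨_, rfl, by simp [hwlen]⟩
      · exact ⟨_, rfl, by simp [hwlen]⟩
    · rw [if_neg hdm, if_neg hdm]
      by_cases hgt : (acc4 info (List.range' 0 10) s).1 - (acc4 info (List.range' 0 10) s).2.1 > md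
      · rw [if_pos hgt, if_pos hgt]
        exact ⟨_, rfl, by simp [hwlen]⟩
      · rw [if_neg hgt, if_neg hgt]
        exact ⟨_, rfl, by simp [hwlen]⟩

theorem gstep_len (n : Int) (info : List Int) (s : Nat) (st : List Int × Int)
    (h : st.1.length = 11) : (gstep n info st s).1.length = 11 := by
  unfold gstep
  cases hf : feas n (cTri info s) with
  | none => simp [Option.elim, h]
  | some c =>
    simp only [Option.elim]
    have hc : c.2.length = 11 := by
      unfold feas cTri at hf
      split_ifs at hf
      all_goals first | (simp only [Option.some.injEq] at hf; rw [← hf]; simp [acc4_len, List.length_range']) | simp at hf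
    unfold gu
    split_ifs <;> simp [h, hc]

theorem fold_proj (n : Int) (info : List Int) : ∀ (L : List Nat) (st : List Int × Int)
    (temp : List Int), temp.length = 11 → st.1.length = 11 →
    ∃ temp', L.foldl (aStep n info) (st.1, temp, st.2) =
        ((L.foldl (gstep n info) st).1, temp', (L.foldl (gstep n info) st).2) ∧
      temp'.length = 11 := by
  intro L
  induction L with
  | nil => intro st temp ht hst; exact ⟨temp, rfl, ht⟩
  | cons s L ih =>
    intro st temp ht hst
    obtain ⟨t1, he, hl⟩ := aStep_eq n info s st.1 temp st.2 ht hst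
    rw [List.foldl_cons, he]
    have := ih (gstep n info st s) t1 hl (gstep_len n info s st hst)
    rw [List.foldl_cons]
    exact this

-- B's DFS enumerates the filtered candidates --------------------------------------------

theorem bDfs_eq (n : Int) (info : List Int) : ∀ (zones : List Nat) (r a c : Int) (dist : List Int),
    bDfs n info zones r a c dist = (enumC info zones r a c dist).filterMap (feas n) := by
  intro zones
  induction zones with
  | nil =>
    intro r a c dist
    simp only [bDfs, enumC, List.filterMap_cons, List.filterMap_nil, feas]
    split <;> simp_all
  | cons i rest ih =>
    intro r a c dist
    simp only [bDfs, enumC, List.filterMap_append, ih]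

theorem range_two_mul_perm : ∀ (m : Nat),
    List.Perm (List.range (2 * m))
      ((List.range m).map (fun x => 2 * x) ++ (List.range m).map (fun x => 2 * x + 1)) := by
  intro m
  induction m with
  | zero => simp
  | succ m ih =>
    have h1 : 2 * (m + 1) = (2 * m + 1) + 1 := by ring
    rw [h1, List.range_succ, List.range_succ, List.range_succ]
    refine List.Perm.trans (((ih.append_right _).append_right _)) ?_
    simp only [List.map_append, List.map_cons, List.map_nil, List.append_assoc]
    refine List.Perm.append_left _ ?_
    exact List.perm_middle

theorem enumC_perm (info : List Int) : ∀ (zones : List Nat) (r a c : Int) (dist : List Int),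
    List.Perm (enumC info zones r a c dist)
      ((List.range (2 ^ zones.length)).map (cT info zones r a c dist)) := by
  intro zones
  induction zones with
  | nil => intro r a c dist; simp [enumC, cT]
  | cons i rest ih =>
    intro r a c dist
    have hpow : 2 ^ (i :: rest).length = 2 * 2 ^ rest.length := by
      simp [List.length_cons, pow_succ, Nat.mul_comm]
    rw [hpow]
    refine List.Perm.trans ?_ ((range_two_mul_perm (2 ^ rest.length)).map _).symm
    simp only [List.map_append, List.map_map]
    have hev : (List.range (2 ^ rest.length)).map (cT info (i :: rest) r a c dist ∘ fun x => 2 * x)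
        = (List.range (2 ^ rest.length)).map
            (cT info rest r (if info.getD i 0 ≠ 0 then a + (10 - (i : Int)) else a) c (dist ++ [0])) := by
      refine List.map_congr_left (fun x _ => ?_)
      have h0 : (2 * x) % 2 = 0 := by omega
      have h2 : (2 * x) / 2 = x := by omega
      simp [cT, h0, h2]
    have hod : (List.range (2 ^ rest.length)).map (cT info (i :: rest) r a c dist ∘ fun x => 2 * x + 1)
        = (List.range (2 ^ rest.length)).map
            (cT info rest (r + (10 - (i : Int))) a (c + (info.getD i 0 + 1)) (dist ++ [info.getD i 0 + 1])) := by
      refine List.map_congr_left (fun x _ => ?_)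
      have h0 : (2 * x + 1) % 2 = 1 := by omega
      have h2 : (2 * x + 1) / 2 = x := by omega
      simp [cT, h0, h2]
    rw [hev, hod]
    exact List.Perm.append (ih _ _ _ _) (ih _ _ _ _)

-- bListGt is a strict total order ------------------------------------------------------

theorem bListGt_asymm : ∀ (x y : List Int), bListGt x y = true → bListGt y x = false := by
  intro x
  induction x with
  | nil => intro y h; cases y <;> simp [bListGt] at h
  | cons a xs ih =>
    intro y h
    cases y with
    | nil => simp [bListGt]
    | cons b ys =>
      simp only [bListGt] at h ⊢
      by_cases h1 : a > b
      · simp [show ¬ b > a by omega, show b < a from h1]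
      · by_cases h2 : a < b
        · simp [h1, h2] at h
        · have hab : a = b := by omega
          subst hab
          simp only [if_neg h1] at h ⊢
          exact ih ys h

theorem bListGt_eq : ∀ (x y : List Int), bListGt x y = false → bListGt y x = false → x = y := by
  intro x
  induction x with
  | nil => intro y h1 h2; cases y with
    | nil => rfl
    | cons b ys => simp [bListGt] at h2
  | cons a xs ih =>
    intro y h1 h2
    cases y with
    | nil => simp [bListGt] at h1
    | cons b ys =>
      simp only [bListGt] at h1 h2
      by_cases hg : a > b
      · simp [hg] at h1
      · by_cases hl : a < b
        · simp [show b > a from hl] at h2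
        · have hab : a = b := by omega
          subst hab
          simp only [if_neg hg] at h1 h2
          rw [ih ys h1 h2]

theorem bListGt_trans : ∀ (x y z : List Int), bListGt x y = true → bListGt y z = true →
    bListGt x z = true := by
  intro x
  induction x with
  | nil => intro y z h1 _; cases y <;> simp [bListGt] at h1
  | cons a xs ih =>
    intro y z h1 h2
    cases y with
    | nil => simp [bListGt] at h2
    | cons b ys =>
      cases z with
      | nil => simp [bListGt]
      | cons c zs =>
        simp only [bListGt] at h1 h2 ⊢
        by_cases hab : a > b <;> by_cases hbc : b > c
        · simp [show a > c by omega]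
        · have h2' : b = c ∧ bListGt ys zs = true := by
            by_cases hlt : b < c
            · simp [hbc, hlt] at h2
            · constructor
              · omega
              · simpa [if_neg hbc, if_neg hlt] using h2
          simp [show a > c by omega]
        · have h1' : a = b ∧ bListGt xs ys = true := by
            by_cases hlt : a < b
            · simp [hab, hlt] at h1
            · constructor
              · omega
              · simpa [if_neg hab, if_neg hlt] using h1
          simp [show a > c by omega]
        · have h1' : a = b ∧ bListGt xs ys = true := by
            by_cases hlt : a < b
            · simp [hab, hlt] at h1
            · exact ⟨by omega, by simpa [if_neg hab, if_neg hlt] using h1⟩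
          have h2' : b = c ∧ bListGt ys zs = true := by
            by_cases hlt : b < c
            · simp [hbc, hlt] at h2
            · exact ⟨by omega, by simpa [if_neg hbc, if_neg hlt] using h2⟩
          have hac : a = c := by omega
          subst hac
          simp only [gt_iff_lt, lt_irrefl, if_false]
          simp [ih ys zs h1'.2 h2'.2]

-- lexicographic key comparison behind Source B's tuple `>`
def keyGt (c b : Int × List Int) : Bool :=
  decide (c.1 > b.1) || (decide (c.1 = b.1) && bListGt c.2.reverse b.2.reverse)

theorem bStep_some (b c : Int × List Int) :
    bStep (some b) c = if (decide (c.1 > 0) && keyGt c b) = true then some c else some b := by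
  simp only [bStep, keyGt]
  split_ifs with h1 h2 h2 <;> first | rfl | (exfalso; simp only [Bool.and_eq_true,
    Bool.or_eq_true, decide_eq_true_eq] at * <;> tauto)

theorem keyGt_asymm (x y : Int × List Int) (h : keyGt x y = true) : keyGt y x = false := by
  simp only [keyGt, Bool.or_eq_true, Bool.and_eq_true, decide_eq_true_eq] at h
  simp only [keyGt, Bool.or_eq_false_iff, Bool.and_eq_false_iff, decide_eq_false_iff_not]
  rcases h with h | ⟨h1, h2⟩
  · exact ⟨by omega, Or.inl (by omega)⟩
  · exact ⟨by omega, Or.inr (bListGt_asymm _ _ h2)⟩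

theorem keyGt_false_eq (x y : Int × List Int) (h1 : keyGt x y = false) (h2 : keyGt y x = false) :
    x = y := by
  simp only [keyGt, Bool.or_eq_false_iff, Bool.and_eq_false_iff,
    decide_eq_false_iff_not] at h1 h2
  have he : x.1 = y.1 := by omega
  rcases h1.2 with h1' | h1'
  · exact absurd he h1'
  · rcases h2.2 with h2' | h2'
    · exact absurd he.symm h2'
    · have := bListGt_eq _ _ h1' h2'
      have hs : x.2 = y.2 := List.reverse_inj.mp this
      exact Prod.ext he hs

theorem keyGt_trans (x y z : Int × List Int) (h1 : keyGt x y = true) (h2 : keyGt y z = true) :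
    keyGt x z = true := by
  simp only [keyGt, Bool.or_eq_true, Bool.and_eq_true, decide_eq_true_eq] at h1 h2 ⊢
  rcases h1 with h1 | ⟨h1a, h1b⟩
  · rcases h2 with h2 | ⟨h2a, h2b⟩
    · exact Or.inl (by omega)
    · exact Or.inl (by omega)
  · rcases h2 with h2 | ⟨h2a, h2b⟩
    · exact Or.inl (by omega)
    · exact Or.inr ⟨by omega, bListGt_trans _ _ _ h1b h2b⟩

theorem bStep_rcomm : ∀ (z : Option (Int × List Int)) (x y : Int × List Int),
    bStep (bStep z x) y = bStep (bStep z y) x := by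
  have pos_step : ∀ (x y : Int × List Int), 0 < x.1 → 0 < y.1 →
      bStep (some x) y = bStep (some y) x := by
    intro x y hx hy
    rw [bStep_some, bStep_some]
    by_cases hk : keyGt y x = true
    · rw [keyGt_asymm _ _ hk]
      simp [hk, decide_eq_true hy]
    · by_cases hk2 : keyGt x y = true
      · simp [hk, hk2, decide_eq_true hx]
      · have := keyGt_false_eq x y (by simpa using hk2) (by simpa using hk)
        subst this
        simp
  intro z x y
  cases z with
  | none =>
    rw [show bStep none x = if x.1 > 0 then some x else none from rfl,
        show bStep none y = if y.1 > 0 then some y else none from rfl]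
    by_cases hx : x.1 > 0 <;> by_cases hy : y.1 > 0
    · rw [if_pos hx, if_pos hy]
      exact pos_step x y hx hy
    · rw [if_pos hx, if_neg hy, bStep_some]
      have hc : ¬ (decide (y.1 > 0) && keyGt y x) = true := by simp [hy]
      rw [if_neg hc, show bStep none x = if x.1 > 0 then some x else none from rfl, if_pos hx]
    · rw [if_neg hx, if_pos hy, bStep_some]
      have hc : ¬ (decide (x.1 > 0) && keyGt x y) = true := by simp [hx]
      rw [if_neg hc, show bStep none y = if y.1 > 0 then some y else none from rfl, if_pos hy]
    · rw [if_neg hx, if_neg hy,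
        show bStep none y = if y.1 > 0 then some y else none from rfl, if_neg hy,
        show bStep none x = if x.1 > 0 then some x else none from rfl, if_neg hx]
  | some b =>
    rw [bStep_some b x, bStep_some b y]
    by_cases cx : (decide (x.1 > 0) && keyGt x b) = true <;>
      by_cases cy : (decide (y.1 > 0) && keyGt y b) = true
    · rw [if_pos cx, if_pos cy]
      have cx' := cx
      have cy' := cy
      simp only [Bool.and_eq_true, decide_eq_true_eq] at cx' cy'
      exact pos_step x y cx'.1 cy'.1
    · rw [if_pos cx, if_neg cy, bStep_some x y, bStep_some b x, if_pos cx]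
      by_cases hyx : (decide (y.1 > 0) && keyGt y x) = true
      · exfalso
        have cx' := cx
        have hyx' := hyx
        simp only [Bool.and_eq_true, decide_eq_true_eq] at cx' hyx'
        exact cy (by simp [hyx'.1, keyGt_trans y x b hyx'.2 cx'.2])
      · rw [if_neg hyx]
    · rw [if_neg cx, if_pos cy, bStep_some b y, if_pos cy, bStep_some y x]
      by_cases hxy : (decide (x.1 > 0) && keyGt x y) = true
      · exfalso
        have cy' := cy
        have hxy' := hxy
        simp only [Bool.and_eq_true, decide_eq_true_eq] at cy' hxy'
        exact cx (by simp [hxy'.1, keyGt_trans x y b hxy'.2 cy'.2])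
      · rw [if_neg hxy]
    · rw [if_neg cx, if_neg cy, bStep_some b y, bStep_some b x, if_neg cx, if_neg cy]

-- the invariant linking A's ghost fold to B's best-scan ---------------------------------

theorem inv_step (st : List Int × Int) (best : Option (Int × List Int)) (c : Int × List Int)
    (h : PInv st best) : PInv (gu st c) (bStep best c) := by
  unfold PInv at h ⊢
  rcases h with ⟨h0, hb⟩ | ⟨hpos, hb⟩ <;> subst hb
  · rw [show bStep none c = if c.1 > 0 then some c else none from rfl]
    by_cases hc : c.1 > 0
    · rw [if_pos hc]
      right
      unfold gu
      rw [if_neg (by omega), if_pos (by omega)]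
      exact ⟨hc, rfl⟩
    · rw [if_neg hc]
      left
      unfold gu
      by_cases he : c.1 = st.2
      · rw [if_pos he]
        split <;> simp [he, h0]
      · rw [if_neg he, if_neg (by omega)]
        exact ⟨h0, rfl⟩
  · unfold gu
    by_cases he : c.1 = st.2
    · rw [if_pos he]
      rw [bStep_some]
      have hcond : (decide (c.1 > 0) && keyGt c (st.2, st.1)) = true
          ↔ bListGt c.2.reverse st.1.reverse = true := by
        simp only [keyGt, Bool.and_eq_true, Bool.or_eq_true, decide_eq_true_eq]
        constructor
        · rintro ⟨-, h | ⟨-, hg⟩⟩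
          · omega
          · exact hg
        · intro hg
          exact ⟨by omega, Or.inr ⟨he, hg⟩⟩
      by_cases hg : bListGt c.2.reverse st.1.reverse = true
      · rw [if_pos (hcond.2 hg), if_pos hg]
        right
        exact ⟨by omega, rfl⟩
      · rw [if_neg (fun hh => hg (hcond.1 hh)), if_neg hg]
        right
        exact ⟨hpos, rfl⟩
    · rw [if_neg he, bStep_some]
      by_cases hgt : c.1 > st.2
      · rw [if_pos hgt, if_pos (by simp [keyGt, hgt]; omega)]
        right
        exact ⟨by omega, rfl⟩
      · rw [if_neg hgt, if_neg (by simp [keyGt, he, hgt])]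
        right
        exact ⟨hpos, rfl⟩

theorem inv_fold : ∀ (L : List (Int × List Int)) (st : List Int × Int)
    (best : Option (Int × List Int)), PInv st best →
    PInv (L.foldl gu st) (L.foldl bStep best) := by
  intro L; induction L with
  | nil => intro st best h; exact h
  | cons c rest ih => intro st best h; exact ih _ _ (inv_step st best c h)

theorem foldl_filterMap' {α β γ : Type} (f : α → Option β) (g : γ → β → γ) :
    ∀ (l : List α) (b : γ), (l.filterMap f).foldl g b =
      l.foldl (fun s x => match f x with | none => s | some y => g s y) b := by
  intro l; induction l with
  | nil => intro b; rfl
  | cons x xs ih =>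
    intro b; simp only [List.filterMap_cons]
    cases h : f x <;> simp [List.foldl_cons, h, ih]

-- ===== VERDICT (by name: the statement is the Claim_ definition above) =====
theorem cTri_zero_nonpos (info : List Int) : (cTri info 0).1 ≤ 0 := by
  have h2 := cT_acc4 info 10 0 0 0 0 0 []
  rw [Nat.shiftRight_zero] at h2
  have h3 := cT_zero info (List.range' 0 10)
    (fun i hi => by
      have := List.mem_range'_1.mp hi
      omega) 0 0 0 []
  have h4 : (cT info (List.range' 0 10) 0 0 0 [] 0).1 = (cTri info 0).1 := by
    rw [h2]
    simp [cTri]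
  rw [← h4]
  simpa using h3

theorem gstep_fused (n : Int) (info : List Int) (L : List Nat) (st : List Int × Int) :
    L.foldl (gstep n info) st
      = ((L.map (cTri info)).filterMap (feas n)).foldl gu st := by
  rw [foldl_filterMap', List.foldl_map]
  congr 1
  funext st x
  unfold gstep
  cases feas n (cTri info x) <;> rfl

set_option maxRecDepth 100000 in
theorem solution_spec : Claim_equal_solution := by
  intro n info _ _
  unfold Spec_solution solution solution_alt
  obtain ⟨temp', hA, -⟩ := fold_proj n info (List.range' 1 1023)
      (List.replicate 11 0, 0) (List.replicate 11 0) (by simp) (by simp)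
  rw [hA]
  rw [bDfs_eq]
  have hperm1 : List.Perm (enumC info (List.range 10) 0 0 0 [])
      ((List.range 1024).map (cT info (List.range 10) 0 0 0 [])) := by
    have h := enumC_perm info (List.range 10) 0 0 0 []
    have hl : (2 : Nat) ^ (List.range 10).length = 1024 := by simp
    rwa [hl] at h
  have hfoldB : ((enumC info (List.range 10) 0 0 0 []).filterMap (feas n)).foldl bStep none
      = (((List.range 1024).map (cT info (List.range 10) 0 0 0 [])).filterMap (feas n)).foldl
          bStep none :=
    (hperm1.filterMap _).foldl_eq' (fun x _ y _ z => bStep_rcomm z x y) none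
  have hmap : (List.range 1024).map (cT info (List.range 10) 0 0 0 [])
      = (List.range 1024).map (cTri info) := by
    refine List.map_congr_left (fun s _ => ?_)
    have h := cT_acc4 info 10 0 s 0 0 0 []
    rw [Nat.shiftRight_zero] at h
    rw [List.range_eq_range', h]
    simp [cTri]
  rw [hfoldB, hmap, show List.range 1024 = 0 :: List.range' 1 1023 by
    rw [List.range_eq_range', show (1024 : Nat) = 1023 + 1 from rfl, List.range'_succ]]
  simp only [List.map_cons, List.filterMap_cons]
  have hG := gstep_fused n info (List.range' 1 1023) (List.replicate 11 0, 0)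
  have hInv := inv_fold (((List.range' 1 1023).map (cTri info)).filterMap (feas n))
      (List.replicate 11 0, 0) none (Or.inl ⟨rfl, rfl⟩)
  rw [← hG] at hInv
  have hrest : ∀ (bfold : Option (Int × List Int)),
      bfold = (((List.range' 1 1023).map (cTri info)).filterMap (feas n)).foldl bStep none →
      (if ((List.range' 1 1023).foldl (gstep n info) (List.replicate 11 0, 0)).2 = 0 then [-1]
        else ((List.range' 1 1023).foldl (gstep n info) (List.replicate 11 0, 0)).1) =
      (match bfold with
        | none => [-1]
        | some b => b.2) := by
    intro bfold hb
    subst hb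
    unfold PInv at hInv
    rcases hInv with ⟨h0, hbn⟩ | ⟨hpos, hbs⟩
    · rw [hbn, h0]
      simp
    · rw [hbs, if_neg (by omega)]
  cases hf0 : feas n (cTri info 0) with
  | none => exact hrest _ rfl
  | some c0 =>
    have hle : c0.1 ≤ 0 := by
      have h1 := cTri_zero_nonpos info
      unfold feas at hf0
      split_ifs at hf0
      simp only [Option.some.injEq] at hf0
      rw [← hf0]
      exact h1
    have hskip : bStep none c0 = none := by
      rw [show bStep none c0 = if c0.1 > 0 then some c0 else none from rfl, if_neg (by omega)]
    have hred : List.foldl bStep none (match some c0 with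
        | none => List.filterMap (feas n) (List.map (cTri info) (List.range' 1 1023))
        | some b => b :: List.filterMap (feas n) (List.map (cTri info) (List.range' 1 1023)))
        = List.foldl bStep (bStep none c0) (List.filterMap (feas n)
            (List.map (cTri info) (List.range' 1 1023))) := rfl
    rw [hred, hskip]
    exact hrest _ rfl
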